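-- pv_equiv track=rewrite | github.com/2eight9/mcggs4_v2 | utils.py | calculate_active_count
-- ===== SOURCE A (Python) =====
-- def get_synergy_tiers():
--     """Daftar Tier Aktif untuk logika konversi."""
--     metro_tiers = list(range(2, 23)) # Metro Zero aktif dari 2 s.d 22
--
--     return {
--         # === FACTION KHUSUS ===
--         "kof": [2, 4, 6, 11], "soul_vessels": [2, 4, 6, 10],
--         "starwing": [2, 4, 6, 10], "luminexus": [2, 4, 6, 10],
--         "aspirant": [2, 4, 6, 10], "toy_mischief": [2, 4, 6, 10],
--         "shadowcell": [2, 4, 6, 10], "metro_zero": metro_tiers,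
--         "mortal_rival": [1, 2], "glory_league": [2, 4, 6],
--         "beyond_the_clouds": [2, 3],
--
--         # === ROLE (CLASS) ===
--         "weapon_master": [2, 4, 6], "marksman": [2, 4, 6], "mage": [2, 4, 6],
--         "defender": [2, 4, 6], "bruiser": [2, 4, 6], "dauntless": [2, 4, 6],
--         "stargazer": [2, 4, 6], "swiftblade": [2, 4, 6], "phasewarper": [2, 4],
--         "scavenger": [2, 3],
--     }
--
-- def calculate_active_count(raw_count, synergy_key):
--     """Mengubah input user menjadi tier aktif terdekat"""
--     tiers_map = get_synergy_tiers()
--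
--     if synergy_key not in tiers_map:
--         return raw_count
--
--     tiers = sorted(tiers_map[synergy_key], reverse=True)
--
--     for tier in tiers:
--         if raw_count >= tier:
--             return tier
--
--     return 0
-- ===== SOURCE B (Python) =====
-- def calculate_active_count(raw_count, synergy_key):
--     """Mengubah input user menjadi tier aktif terdekat.
--     The tier table is grouped by shared tier pattern (most keys use [2,4,6,10] or
--     [2,4,6]); the answer is the largest qualifying tier, computed by a running
--     maximum over the pattern -- no dict of 21 lists, no sort, no early-exit scan."""
--     special = {
--         "kof": [2, 4, 6, 11],
--         "metro_zero": list(range(2, 23)),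
--         "mortal_rival": [1, 2],
--         "beyond_the_clouds": [2, 3],
--         "phasewarper": [2, 4],
--         "scavenger": [2, 3],
--     }
--     ten_cap = {"soul_vessels", "starwing", "luminexus", "aspirant",
--                "toy_mischief", "shadowcell"}
--     standard = {"mage", "marksman", "defender", "bruiser", "dauntless",
--                 "glory_league", "weapon_master", "stargazer", "swiftblade"}
--
--     if synergy_key in special:
--         tiers = special[synergy_key]
--     elif synergy_key in ten_cap:
--         tiers = [2, 4, 6, 10]
--     elif synergy_key in standard:
--         tiers = [2, 4, 6]
--     else:
--         return raw_count
--
--     best = 0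
--     for t in tiers:
--         if t <= raw_count and t > best:
--             best = t
--     return best
-- ===== Notes on version B (the rewrite author's own statement) =====
-- stated objective: simpler
-- what changed: Groups the 21-key tier table into three pattern groups (six irregular keys, the [2,4,6,10] group, the [2,4,6] group) and replaces the descending sort plus first-match scan with a single running-maximum pass over the ascending tiers.
import Mathlib
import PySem

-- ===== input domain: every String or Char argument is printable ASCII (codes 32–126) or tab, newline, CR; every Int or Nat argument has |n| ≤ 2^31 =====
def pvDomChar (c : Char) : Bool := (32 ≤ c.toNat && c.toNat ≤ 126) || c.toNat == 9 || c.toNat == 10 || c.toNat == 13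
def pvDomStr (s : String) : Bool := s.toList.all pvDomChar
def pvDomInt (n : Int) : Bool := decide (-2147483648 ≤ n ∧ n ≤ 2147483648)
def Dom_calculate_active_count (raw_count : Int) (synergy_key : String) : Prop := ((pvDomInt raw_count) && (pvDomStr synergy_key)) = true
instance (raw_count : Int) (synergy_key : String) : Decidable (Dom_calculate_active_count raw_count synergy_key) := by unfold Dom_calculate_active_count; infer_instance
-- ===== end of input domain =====

-- B regroups the 21-entry dict of tier lists into three pattern groups and replaces A's
-- descending sort + first-match scan by a running maximum over the tiers (simpler; identical results).

-- ===== PORT A =====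
-- A's get_synergy_tiers(): the full 21-key dict
def pvGetSynergyTiers : PySem.Dict String (List Int) :=
  let metro_tiers := PySem.List.pyRange 2 23
  PySem.Dict.ofList
    [("kof", [2, 4, 6, 11]), ("soul_vessels", [2, 4, 6, 10]),
     ("starwing", [2, 4, 6, 10]), ("luminexus", [2, 4, 6, 10]),
     ("aspirant", [2, 4, 6, 10]), ("toy_mischief", [2, 4, 6, 10]),
     ("shadowcell", [2, 4, 6, 10]), ("metro_zero", metro_tiers),
     ("mortal_rival", [1, 2]), ("glory_league", [2, 4, 6]),
     ("beyond_the_clouds", [2, 3]),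
     ("weapon_master", [2, 4, 6]), ("marksman", [2, 4, 6]), ("mage", [2, 4, 6]),
     ("defender", [2, 4, 6]), ("bruiser", [2, 4, 6]), ("dauntless", [2, 4, 6]),
     ("stargazer", [2, 4, 6]), ("swiftblade", [2, 4, 6]), ("phasewarper", [2, 4]),
     ("scavenger", [2, 3])]

-- A's 'for tier in tiers: if raw_count >= tier: return tier' / 'return 0'
def pvScanTiers (raw_count : Int) : List Int → Int
  | [] => 0
  | tier :: rest => if raw_count ≥ tier then tier else pvScanTiers raw_count rest

def calculate_active_count (raw_count : Int) (synergy_key : String) : Int :=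
  let tiers_map := pvGetSynergyTiers
  match tiers_map.get? synergy_key with
  | none => raw_count
  | some ts => pvScanTiers raw_count (PySem.List.sorted ts (fun x => x) true)

-- ===== PORT B =====
-- B's grouped tables: the six irregular keys with their lists, and two pattern groups
def pvSpecial : PySem.Dict String (List Int) :=
  PySem.Dict.ofList
    [("kof", [2, 4, 6, 11]), ("metro_zero", PySem.List.pyRange 2 23),
     ("mortal_rival", [1, 2]), ("beyond_the_clouds", [2, 3]),
     ("phasewarper", [2, 4]), ("scavenger", [2, 3])]

def pvTenCap : PySem.Set String :=
  PySem.Set.ofList ["soul_vessels", "starwing", "luminexus", "aspirant",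
                    "toy_mischief", "shadowcell"]

def pvStandard : PySem.Set String :=
  PySem.Set.ofList ["mage", "marksman", "defender", "bruiser", "dauntless",
                    "glory_league", "weapon_master", "stargazer", "swiftblade"]

-- B's running-maximum loop: best = 0; for t in tiers: if t <= raw_count and t > best: best = t
def pvBestTier (raw_count : Int) (tiers : List Int) : Int :=
  tiers.foldl (fun best t => if t ≤ raw_count ∧ t > best then t else best) 0

def calculate_active_count_alt (raw_count : Int) (synergy_key : String) : Int :=
  match pvSpecial.get? synergy_key with
  | some tiers => pvBestTier raw_count tiers
  | none =>
    if synergy_key ∈ pvTenCap then pvBestTier raw_count [2, 4, 6, 10]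
    else if synergy_key ∈ pvStandard then pvBestTier raw_count [2, 4, 6]
    else raw_count

-- ===== PRECONDITION & SPEC =====
def Spec_calculate_active_count (raw_count : Int) (synergy_key : String) (out : Int) : Prop := out = calculate_active_count_alt raw_count synergy_key
instance (raw_count : Int) (synergy_key : String) (out : Int) : Decidable (Spec_calculate_active_count raw_count synergy_key out) := by unfold Spec_calculate_active_count; infer_instance

-- ===== CLAIM (what is proved, stated in full; the proofs are below) =====
def Claim_equal_calculate_active_count : Prop := ∀ (raw_count : Int) (synergy_key : String), Dom_calculate_active_count raw_count synergy_key → Spec_calculate_active_count raw_count synergy_key (calculate_active_count raw_count synergy_key)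

-- ===== LEMMAS AND PROOFS =====

-- all keys either program treats specially
def pvAllKeys : List String :=
  ["kof", "soul_vessels", "starwing", "luminexus", "aspirant", "toy_mischief",
   "shadowcell", "metro_zero", "mortal_rival", "glory_league", "beyond_the_clouds",
   "weapon_master", "marksman", "mage", "defender", "bruiser", "dauntless",
   "stargazer", "swiftblade", "phasewarper", "scavenger"]

-- B's running-maximum loop started from an arbitrary accumulator
def pvBestFrom (n b : Int) (l : List Int) : Int :=
  l.foldl (fun best t => if t ≤ n ∧ t > best then t else best) b

theorem pvBestTier_eq_from (n : Int) (l : List Int) : pvBestTier n l = pvBestFrom n 0 l := rfl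

theorem pvBestFrom_lt (n x : Int) (l : List Int) :
    ∀ b : Int, b < x → (∀ t ∈ l, t < x) → pvBestFrom n b l < x := by
  induction l with
  | nil => intro b hb _; exact hb
  | cons t rest ih =>
      intro b hb hl
      have ht : t < x := hl t List.mem_cons_self
      have hrest : ∀ u ∈ rest, u < x := fun u hu => hl u (List.mem_cons_of_mem _ hu)
      simp only [pvBestFrom, List.foldl_cons]
      split_ifs with h
      · exact ih t ht hrest
      · exact ih b hb hrest

-- A's first-match scan over a strictly descending positive list is B's running max over the ascending reversal
theorem pvScan_desc (n : Int) (l : List Int)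
    (h : l.Pairwise (fun a b : Int => b < a)) (hpos : ∀ t ∈ l, 0 < t) :
    pvScanTiers n l = pvBestTier n l.reverse := by
  induction l with
  | nil => rfl
  | cons t rest ih =>
      rcases List.pairwise_cons.mp h with ⟨hub, hrest⟩
      have hposr : ∀ u ∈ rest, 0 < u := fun u hu => hpos u (List.mem_cons_of_mem _ hu)
      have hB : pvBestTier n rest.reverse < t := by
        rw [pvBestTier_eq_from]
        exact pvBestFrom_lt n t rest.reverse 0 (hpos t List.mem_cons_self)
          (fun u hu => hub u (List.mem_reverse.mp hu))
      have key : pvBestTier n (rest.reverse ++ [t]) =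
          if t ≤ n ∧ t > pvBestTier n rest.reverse then t else pvBestTier n rest.reverse := by
        simp [pvBestTier, List.foldl_append]
      simp only [pvScanTiers, List.reverse_cons]
      rw [key]
      by_cases hn : n ≥ t
      · rw [if_pos hn, if_pos ⟨hn, hB⟩]
      · rw [if_neg hn, if_neg (fun h' => hn h'.1), ih hrest hposr]

-- closed evaluations of A's per-key descending sorts
theorem pv_sorted_kof : PySem.List.sorted [2, 4, 6, 11] (fun x : Int => x) true = [11, 6, 4, 2] := by decide
theorem pv_sorted_ten : PySem.List.sorted [2, 4, 6, 10] (fun x : Int => x) true = [10, 6, 4, 2] := by decide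
theorem pv_sorted_std : PySem.List.sorted [2, 4, 6] (fun x : Int => x) true = [6, 4, 2] := by decide
theorem pv_sorted_mr : PySem.List.sorted [1, 2] (fun x : Int => x) true = [2, 1] := by decide
theorem pv_sorted_23 : PySem.List.sorted [2, 3] (fun x : Int => x) true = [3, 2] := by decide
theorem pv_sorted_24 : PySem.List.sorted [2, 4] (fun x : Int => x) true = [4, 2] := by decide
theorem pv_range_metro : PySem.List.pyRange 2 23 =
    [2, 3, 4, 5, 6, 7, 8, 9, 10, 11, 12, 13, 14, 15, 16, 17, 18, 19, 20, 21, 22] := by decide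
theorem pv_sorted_metro : PySem.List.sorted
    [2, 3, 4, 5, 6, 7, 8, 9, 10, 11, 12, 13, 14, 15, 16, 17, 18, 19, 20, 21, 22] (fun x : Int => x) true =
    [22, 21, 20, 19, 18, 17, 16, 15, 14, 13, 12, 11, 10, 9, 8, 7, 6, 5, 4, 3, 2] := by decide

-- on every key of the table, A's sorted scan and B's grouped running maximum agree
theorem pv_agree_on_keys (raw_count : Int) (synergy_key : String)
    (hk : synergy_key ∈ pvAllKeys) :
    calculate_active_count raw_count synergy_key =
      calculate_active_count_alt raw_count synergy_key := by
  simp only [pvAllKeys, List.mem_cons, List.not_mem_nil, or_false] at hk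
  rcases hk with rfl|rfl|rfl|rfl|rfl|rfl|rfl|rfl|rfl|rfl|rfl|rfl|rfl|rfl|rfl|rfl|rfl|rfl|rfl|rfl|rfl <;>
    · simp only [calculate_active_count, calculate_active_count_alt]
      simp [pvGetSynergyTiers, pvSpecial, pvTenCap, pvStandard,
        PySem.Dict.ofList, PySem.Dict.update, PySem.Dict.get?_insert,
        PySem.Set.ofList, pv_sorted_kof, pv_sorted_ten, pv_sorted_std,
        pv_sorted_mr, pv_sorted_23, pv_sorted_24, pv_sorted_metro, pv_range_metro]
      rw [pvScan_desc raw_count _ (by decide) (by decide)]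
      norm_num

-- off the table, both programs return raw_count
theorem pv_agree_off_keys (raw_count : Int) (synergy_key : String)
    (hk : synergy_key ∉ pvAllKeys) :
    calculate_active_count raw_count synergy_key =
      calculate_active_count_alt raw_count synergy_key := by
  simp only [pvAllKeys, List.mem_cons, List.not_mem_nil, or_false, not_or] at hk
  obtain ⟨h1,h2,h3,h4,h5,h6,h7,h8,h9,h10,h11,h12,h13,h14,h15,h16,h17,h18,h19,h20,h21⟩ := hk
  simp [calculate_active_count, calculate_active_count_alt,
    pvGetSynergyTiers, pvSpecial, pvTenCap, pvStandard,
    PySem.Dict.ofList, PySem.Dict.update, PySem.Dict.get?_insert, PySem.Set.ofList,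
    h1,h2,h3,h4,h5,h6,h7,h8,h9,h10,h11,h12,h13,h14,h15,h16,h17,h18,h19,h20,h21]

-- ===== VERDICT (by name: the statement is the Claim_ definition above) =====
theorem calculate_active_count_spec : Claim_equal_calculate_active_count := by
  intro raw_count synergy_key _
  unfold Spec_calculate_active_count
  by_cases hk : synergy_key ∈ pvAllKeys
  · exact pv_agree_on_keys raw_count synergy_key hk
  · exact pv_agree_off_keys raw_count synergy_key hk
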